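-- pv_equiv track=rewrite | github.com/Sreehari-Ramesh/multi-agent-travel-assistant-system | backend/app/imap.py | _strip_quoted_reply
-- ===== SOURCE A (Python) =====
-- def _strip_quoted_reply(text: str) -> str:
--     """
--     Demo-grade cleanup: take top part of reply before common quote markers.
--     """
--     markers = [
--         "\nOn ",           # Gmail/Outlook style
--         "\nFrom:",         # quoted block
--         "\n-----Original Message-----",
--         "\n> ",            # inline quote
--     ]
--     cut = len(text)
--     for m in markers:
--         idx = text.find(m)
--         if idx != -1:
--             cut = min(cut, idx)
--     return text[:cut].strip()
-- ===== SOURCE B (Python) =====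
-- def _strip_quoted_reply(text: str) -> str:
--     """Single forward scan: cut at the first position where any quote marker starts."""
--     markers = ("\nOn ", "\nFrom:", "\n-----Original Message-----", "\n> ")
--     for i, ch in enumerate(text):
--         if ch == "\n" and text.startswith(markers, i):
--             return text[:i].strip()
--     return text.strip()
-- ===== Notes on version B (the rewrite author's own statement) =====
-- stated objective: idiomatic
-- what changed: Replaced four separate str.find passes plus a running min with a single forward scan that stops at the first position where any marker starts (one tuple-startswith check per newline).
import Mathlib
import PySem

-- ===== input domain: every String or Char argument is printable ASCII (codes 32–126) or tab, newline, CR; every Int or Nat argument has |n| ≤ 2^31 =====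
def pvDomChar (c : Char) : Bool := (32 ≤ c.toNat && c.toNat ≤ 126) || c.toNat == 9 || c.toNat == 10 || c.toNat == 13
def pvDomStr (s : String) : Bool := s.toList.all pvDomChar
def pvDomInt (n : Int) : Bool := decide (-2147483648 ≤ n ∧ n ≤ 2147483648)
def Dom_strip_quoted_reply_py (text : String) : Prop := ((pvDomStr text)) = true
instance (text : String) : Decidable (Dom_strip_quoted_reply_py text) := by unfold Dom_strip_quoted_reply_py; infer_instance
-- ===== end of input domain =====

-- B replaces A's four full str.find passes plus a running minimum by one forward scan
-- that stops at the first position where any quote marker starts (objective: idiomatic one-pass form).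

-- ===== PORT A =====
-- A's marker list and its `for m in markers` find/min loop
def pvMarkersA : List String := ["\nOn ", "\nFrom:", "\n-----Original Message-----", "\n> "]

def pvCutA (text : String) : Int :=
  pvMarkersA.foldl
    (fun cut m =>
      let idx := PySem.Str.find text m
      if idx ≠ -1 then min cut idx else cut)
    (PySem.Str.len text)

def strip_quoted_reply_py (text : String) : String :=
  PySem.Str.strip (PySem.Str.slice text none (some (pvCutA text)))

-- ===== PORT B =====
def pvAltMarkers : List String := ["\nOn ", "\nFrom:", "\n-----Original Message-----", "\n> "]

-- transliteration of B's `for i, ch in enumerate(text)` loop: `rest` is the suffix of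
-- `text` from position `i`; `text.startswith(markers, i)` is the tuple-startswith check
-- ported as `any` of `Chars.startswith` over the suffix (exact: same markers, same position).
def pvAltScan (text : String) (i : Nat) (rest : List Char) : String :=
  match rest with
  | [] => PySem.Str.strip text
  | c :: cs =>
    if c == '\n' && pvAltMarkers.any (fun m => PySem.Chars.startswith (c :: cs) m.toList) then
      PySem.Str.strip (PySem.Str.slice text none (some (i : Int)))
    else
      pvAltScan text (i + 1) cs

def strip_quoted_reply_py_alt (text : String) : String :=
  pvAltScan text 0 text.toList

-- ===== PRECONDITION & SPEC =====
def Spec_strip_quoted_reply_py (text : String) (out : String) : Prop := out = strip_quoted_reply_py_alt text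
instance (text : String) (out : String) : Decidable (Spec_strip_quoted_reply_py text out) := by unfold Spec_strip_quoted_reply_py; infer_instance

-- ===== CLAIM (what is proved, stated in full; the proofs are below) =====
def Claim_equal_strip_quoted_reply_py : Prop := ∀ (text : String), Dom_strip_quoted_reply_py text → Spec_strip_quoted_reply_py text (strip_quoted_reply_py text)

-- ===== LEMMAS AND PROOFS =====

-- the boolean hit test of B's loop, as a predicate on a suffix
def pvHit (l : List Char) : Bool :=
  match l with
  | [] => false
  | c :: cs => c == '\n' && pvAltMarkers.any (fun m => PySem.Chars.startswith (c :: cs) m.toList)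

-- index at which B's scan stops
def pvScanIdx : List Char → Nat
  | [] => 0
  | c :: cs => if pvHit (c :: cs) then 0 else pvScanIdx cs + 1

theorem pvHit_iff (l : List Char) :
    pvHit l = true ↔ ∃ m ∈ pvAltMarkers, m.toList <+: l := by
  cases l with
  | nil =>
    simp only [pvHit, pvAltMarkers]
    constructor
    · intro h; cases h
    · rintro ⟨m, hm, hp⟩
      simp only [List.mem_cons, List.not_mem_nil, or_false] at hm
      rcases hm with h | h | h | h <;> subst h <;>
        exact absurd (List.eq_nil_of_prefix_nil hp) (by decide)
  | cons c cs =>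
    simp only [pvHit, Bool.and_eq_true, List.any_eq_true, PySem.Chars.startswith_iff, beq_iff_eq]
    constructor
    · rintro ⟨_, m, hm, hp⟩; exact ⟨m, hm, hp⟩
    · rintro ⟨m, hm, hp⟩
      refine ⟨?_, m, hm, hp⟩
      have hall : ∀ m' ∈ pvAltMarkers, m'.toList.head? = some '\n' := by decide
      have hh := hall m hm
      cases hml : m.toList with
      | nil => rw [hml] at hh; simp at hh
      | cons a t =>
        rw [hml] at hh hp
        simp only [List.head?_cons, Option.some.injEq] at hh
        have hac : a = c := (List.cons_prefix_cons.mp hp).1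
        rw [← hac]; exact hh

theorem pvScanIdx_le (s : List Char) : pvScanIdx s ≤ s.length := by
  induction s with
  | nil => simp [pvScanIdx]
  | cons c cs ih =>
    simp only [pvScanIdx, List.length_cons]
    split <;> omega

theorem pvScanIdx_no_hit_before (s : List Char) :
    ∀ j < pvScanIdx s, pvHit (s.drop j) = false := by
  induction s with
  | nil => intro j hj; simp [pvScanIdx] at hj
  | cons c cs ih =>
    intro j hj
    simp only [pvScanIdx] at hj
    split at hj
    · omega
    · cases j with
      | zero =>
        simp only [List.drop_zero]
        rename_i h
        exact Bool.not_eq_true _ ▸ (by simpa using h)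
      | succ k =>
        simpa using ih k (by omega)

theorem pvScanIdx_hit_or_len (s : List Char) :
    pvScanIdx s = s.length ∨ pvHit (s.drop (pvScanIdx s)) = true := by
  induction s with
  | nil => left; simp [pvScanIdx]
  | cons c cs ih =>
    simp only [pvScanIdx]
    split
    · right; simpa
    · rcases ih with h | h
      · left; simp [h]
      · right; simpa using h

-- B's scan computes strip (take (i + pvScanIdx rest)) of the text, given rest = drop i
theorem pvAltScan_eq (text : String) :
    ∀ (rest : List Char) (i : Nat), i ≤ text.toList.length → rest = text.toList.drop i →
      (pvAltScan text i rest).toList =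
        PySem.Chars.strip (text.toList.take (i + pvScanIdx rest)) := by
  intro rest
  induction rest with
  | nil =>
    intro i hi hr
    have hlen : text.toList.length ≤ i := List.drop_eq_nil_iff.mp hr.symm
    have hieq : i = text.toList.length := le_antisymm hi hlen
    subst hieq
    simp [pvAltScan, pvScanIdx, PySem.Str.toList_strip, List.take_of_length_le]
  | cons c cs ih =>
    intro i hi hr
    simp only [pvAltScan, pvScanIdx]
    have hcond : (c == '\n' && pvAltMarkers.any (fun m => PySem.Chars.startswith (c :: cs) m.toList))
        = pvHit (c :: cs) := by simp [pvHit]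
    rw [hcond]
    by_cases h : pvHit (c :: cs) = true
    · simp only [h, if_true]
      rw [PySem.Str.toList_strip, PySem.Str.toList_slice, PySem.Chars.slice_eq_listSlice,
        PySem.List.slice_to_natCast]
      simp
    · simp only [Bool.not_eq_true] at h
      simp only [h, Bool.false_eq_true, if_false]
      have hi' : i + 1 ≤ text.toList.length := by
        have hlc := congrArg List.length hr
        simp only [List.length_cons, List.length_drop] at hlc
        omega
      have hr' : cs = text.toList.drop (i + 1) := by
        have ht := congrArg List.tail hr
        rwa [List.tail_cons, List.tail_drop] at ht
      rw [ih (i + 1) hi' hr']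
      ring_nf

-- A's fold value equals B's scan index
theorem pvCutA_eq (text : String) : pvCutA text = (pvScanIdx text.toList : Int) := by
  set s := text.toList with hs
  set K := pvScanIdx s with hK
  have hKlen : K ≤ s.length := pvScanIdx_le s
  have key : ∀ m ∈ pvAltMarkers,
      PySem.Chars.find s m.toList = -1 ∨ (K : Int) ≤ PySem.Chars.find s m.toList := by
    intro m hm
    by_cases hf : PySem.Chars.find s m.toList = -1
    · exact Or.inl hf
    · right
      have h0 : 0 ≤ PySem.Chars.find s m.toList := by
        have := PySem.Chars.neg_one_le_find s m.toList
        omega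
      obtain ⟨hp, _⟩ := PySem.Chars.find_spec h0
      have hhit : pvHit (s.drop (PySem.Chars.find s m.toList).toNat) = true :=
        (pvHit_iff _).mpr ⟨m, hm, hp⟩
      have hge : ¬ (PySem.Chars.find s m.toList).toNat < K := by
        intro hlt
        have := pvScanIdx_no_hit_before s _ hlt
        simp [hhit] at this
      omega
  have hEx : (∃ m ∈ pvAltMarkers, PySem.Chars.find s m.toList ≠ -1 ∧
        PySem.Chars.find s m.toList ≤ (K : Int)) ∨ K = s.length := by
    rcases pvScanIdx_hit_or_len s with h | h
    · right; exact h
    · left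
      obtain ⟨m, hm, hp⟩ := (pvHit_iff _).mp h
      have hin : PySem.Chars.isIn m.toList s = true :=
        (PySem.Chars.exists_prefix_drop_iff_isIn m.toList s).mp ⟨K, hp⟩
      have hf : PySem.Chars.find s m.toList ≠ -1 := by
        intro hc
        exact (PySem.Chars.find_eq_neg_one_iff s m.toList).mp hc
          ((PySem.Chars.isIn_iff_infix m.toList s).mp hin)
      have h0 : 0 ≤ PySem.Chars.find s m.toList := by
        have := PySem.Chars.neg_one_le_find s m.toList
        omega
      obtain ⟨_, hmin⟩ := PySem.Chars.find_spec h0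
      have hnlt : ¬ K < (PySem.Chars.find s m.toList).toNat := fun hlt => hmin K hlt hp
      exact ⟨m, hm, hf, by omega⟩
  have hub : (PySem.Chars.find s "\nOn ".toList ≠ -1 ∧ PySem.Chars.find s "\nOn ".toList ≤ (K : Int)) ∨
      (PySem.Chars.find s "\nFrom:".toList ≠ -1 ∧ PySem.Chars.find s "\nFrom:".toList ≤ (K : Int)) ∨
      (PySem.Chars.find s "\n-----Original Message-----".toList ≠ -1 ∧ PySem.Chars.find s "\n-----Original Message-----".toList ≤ (K : Int)) ∨
      (PySem.Chars.find s "\n> ".toList ≠ -1 ∧ PySem.Chars.find s "\n> ".toList ≤ (K : Int)) ∨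
      K = s.length := by
    rcases hEx with ⟨m, hm, h⟩ | h
    · simp only [pvAltMarkers, List.mem_cons, List.not_mem_nil, or_false] at hm
      rcases hm with rfl | rfl | rfl | rfl
      · exact Or.inl h
      · exact Or.inr (Or.inl h)
      · exact Or.inr (Or.inr (Or.inl h))
      · exact Or.inr (Or.inr (Or.inr (Or.inl h)))
    · exact Or.inr (Or.inr (Or.inr (Or.inr h)))
  have hK1 := key "\nOn " (by simp [pvAltMarkers])
  have hK2 := key "\nFrom:" (by simp [pvAltMarkers])
  have hK3 := key "\n-----Original Message-----" (by simp [pvAltMarkers])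
  have hK4 := key "\n> " (by simp [pvAltMarkers])
  have hlen : PySem.Str.len text = (s.length : Int) := by
    simp [PySem.Str.len_eq, hs]
  simp only [pvCutA, pvMarkersA, List.foldl, PySem.Str.find_eq, hlen, ← hs]
  split_ifs <;> omega

-- ===== VERDICT (by name: the statement is the Claim_ definition above) =====
theorem strip_quoted_reply_py_spec : Claim_equal_strip_quoted_reply_py := by
  intro text _
  unfold Spec_strip_quoted_reply_py strip_quoted_reply_py strip_quoted_reply_py_alt
  apply String.toList_inj.mp
  rw [pvCutA_eq text]
  rw [pvAltScan_eq text text.toList 0 (by omega) (by simp)]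
  rw [PySem.Str.toList_strip, PySem.Str.toList_slice, PySem.Chars.slice_eq_listSlice,
    PySem.List.slice_to_natCast]
  simp
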